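-- pv_equiv track=rewrite | github.com/JPplayground/SierraLeoneDataset | data_cleanse_steps/remove_extra_spaces.py | remove_extra_spaces
-- ===== SOURCE A (Python) =====
-- def remove_extra_spaces(data):
--
--     with_spaces_removed = []
--
--     for i in range(len(data)):
--         line = data[i]
--         line_list = line.split(" ")
--         line_with_removed_spaces = [s for s in line_list if s]
--         line = " ".join(line_with_removed_spaces)
--         with_spaces_removed.append(line)
--
--     return with_spaces_removed
-- ===== SOURCE B (Python) =====
-- import re
--
-- def remove_extra_spaces(data):
--     result = []
--     for line in data:
--         result.append(re.sub(' +', ' ', line).strip(' '))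
--     return result
-- ===== Notes on version B (the rewrite author's own statement) =====
-- stated objective: idiomatic
-- what changed: Instead of splitting each line on spaces, filtering out empty pieces and re-joining, B collapses each run of spaces with a single regex substitution and strips the remaining leading/trailing space.
import Mathlib
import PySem

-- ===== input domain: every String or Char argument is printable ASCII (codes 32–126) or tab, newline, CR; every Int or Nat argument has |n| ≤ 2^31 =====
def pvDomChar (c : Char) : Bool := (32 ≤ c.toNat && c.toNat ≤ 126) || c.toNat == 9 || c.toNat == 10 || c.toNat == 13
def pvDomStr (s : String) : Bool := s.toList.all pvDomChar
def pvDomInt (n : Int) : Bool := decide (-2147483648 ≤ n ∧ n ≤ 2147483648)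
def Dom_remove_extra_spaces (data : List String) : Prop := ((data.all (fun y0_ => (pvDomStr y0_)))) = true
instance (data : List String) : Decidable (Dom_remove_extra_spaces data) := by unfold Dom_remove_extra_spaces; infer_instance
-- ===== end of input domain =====

-- B collapses each run of spaces with one regex substitution and strips the leading/trailing
-- space, instead of A's split-on-space / filter-empties / re-join (objective: idiomatic).

-- ===== PORT A =====
def remove_extra_spaces (data : List String) : List String :=
  (PySem.List.pyRange 0 (data.length : Int) 1).foldl
    (fun acc i =>
      let line := PySem.List.pyGetD data i ""
      -- line.split(" "): the separator " " is non-empty, so split? is always `some`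
      let line_list := (PySem.Str.split? line " ").getD []
      let line_with_removed_spaces := line_list.filter (fun s => s != "")
      acc ++ [PySem.Str.join " " line_with_removed_spaces])
    []

-- ===== PORT B =====
-- exact port of re.sub(' +', ' ', line) on the character list: every maximal run of
-- literal spaces (a match of ' +') becomes a single space
def pvCollapse : List Char → List Char
  | [] => []
  | [c] => [c]
  | a :: b :: rest =>
      if a == ' ' && b == ' ' then pvCollapse (b :: rest)
      else a :: pvCollapse (b :: rest)

def remove_extra_spaces_alt (data : List String) : List String :=
  data.foldl
    (fun result line =>
      result ++ [PySem.Str.stripChars (String.ofList (pvCollapse line.toList)) " "])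
    []

-- ===== PRECONDITION & SPEC =====
def Spec_remove_extra_spaces (data : List String) (out : List String) : Prop := out = remove_extra_spaces_alt data
instance (data : List String) (out : List String) : Decidable (Spec_remove_extra_spaces data out) := by unfold Spec_remove_extra_spaces; infer_instance

-- ===== CLAIM (what is proved, stated in full; the proofs are below) =====
def Claim_equal_remove_extra_spaces : Prop := ∀ (data : List String), Dom_remove_extra_spaces data → Spec_remove_extra_spaces data (remove_extra_spaces data)

-- ===== LEMMAS AND PROOFS =====

-- simple structural model of line.split(" ")
def splitSp : List Char → List (List Char)
  | [] => [[]]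
  | c :: r => if c == ' ' then [] :: splitSp r else (splitSp r).modifyHead (fun w => c :: w)

-- trailing-space strip on a char list
def rstripSp (l : List Char) : List Char := (List.dropWhile (fun c => c == ' ') l.reverse).reverse

-- A's per-line value, at the char-list level
def pvLa (cs : List Char) : List Char :=
  PySem.Chars.join [' '] ((splitSp cs).filter (fun w => !w.isEmpty))

-- B's per-line value, at the char-list level
def pvLb (cs : List Char) : List Char :=
  rstripSp (List.dropWhile (fun c => c == ' ') (pvCollapse cs))

theorem modifyHead_fun_id {α : Type} (l : List α) : List.modifyHead (fun w => w) l = l := by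
  cases l <;> rfl

theorem dropWhile_eq_self_of_all {α : Type} (p : α → Bool) (l : List α)
    (h : ∀ x ∈ l, p x = false) : List.dropWhile p l = l := by
  cases l with
  | nil => rfl
  | cons a t => simp [List.dropWhile, h a (by simp)]

theorem head_dropWhile_false {α : Type} (p : α → Bool) (r : List α) (b : α) (r2 : List α)
    (h : List.dropWhile p r = b :: r2) : p b = false := by
  induction r with
  | nil => simp at h
  | cons a t ih =>
    by_cases hp : p a = true
    · rw [List.dropWhile_cons_of_pos hp] at h; exact ih h
    · rw [List.dropWhile_cons_of_neg hp] at h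
      cases h; simpa using hp

theorem splitOn_go_eq (l : List Char) : ∀ (fuel : Nat) (cur : List Char) (acc : List (List Char)),
    l.length < fuel →
    PySem.Chars.splitOn.go [' '] fuel l cur acc
      = acc.reverse ++ (splitSp l).modifyHead (fun w => cur.reverse ++ w) := by
  induction l with
  | nil =>
    intro fuel cur acc h
    obtain ⟨f, rfl⟩ : ∃ f, fuel = f + 1 := ⟨fuel - 1, by omega⟩
    rw [PySem.Chars.splitOn.go.eq_def]
    simp [splitSp]
  | cons c rest ih =>
    intro fuel cur acc h
    obtain ⟨f, rfl⟩ : ∃ f, fuel = f + 1 := ⟨fuel - 1, by omega⟩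
    rw [PySem.Chars.splitOn.go.eq_def]
    simp only [List.isPrefixOf, List.length_cons] at *
    by_cases hc : c == ' '
    · have hc' : (' ' == c) = true := by
        simp at hc; simp [hc]
      simp only [hc', Bool.true_and, if_pos, List.length_nil, Nat.zero_add,
        List.drop_succ_cons, List.drop_zero]
      rw [ih f [] (cur.reverse :: acc) (by omega)]
      simp [splitSp, hc, modifyHead_fun_id]
    · have hc' : (' ' == c) = false := by
        simp at hc ⊢; intro hh; exact hc hh.symm
      simp only [hc', Bool.false_and, if_neg, Bool.false_eq_true, not_false_eq_true]
      rw [ih f (c :: cur) acc (by omega)]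
      simp only [splitSp, hc, if_neg, Bool.false_eq_true, not_false_eq_true,
        List.modifyHead_modifyHead]
      have hfun : (fun w => (c :: cur).reverse ++ w)
          = ((fun w => cur.reverse ++ w) ∘ fun w => c :: w) := by
        funext w; simp
      rw [hfun]

theorem splitOn_eq_splitSp (cs : List Char) :
    PySem.Chars.splitOn cs [' '] = splitSp cs := by
  unfold PySem.Chars.splitOn
  rw [splitOn_go_eq cs (cs.length + 1) [] [] (by omega)]
  simp [modifyHead_fun_id]

theorem splitSp_nonspace_append (w rest : List Char) (h : ∀ x ∈ w, (x == ' ') = false) :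
    splitSp (w ++ rest) = (splitSp rest).modifyHead (fun v => w ++ v) := by
  induction w with
  | nil =>
    simp only [List.nil_append]
    exact (modifyHead_fun_id _).symm
  | cons a t ih =>
    have ha : (a == ' ') = false := h a (by simp)
    simp only [List.cons_append, splitSp, ha, Bool.false_eq_true, if_neg, not_false_eq_true,
      ih (fun x hx => h x (by simp [hx])), List.modifyHead_modifyHead]
    rfl

theorem collapse_nonspace_append (w rest : List Char) (h : ∀ x ∈ w, (x == ' ') = false) :
    pvCollapse (w ++ rest) = w ++ pvCollapse rest := by
  induction w with
  | nil => rfl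
  | cons a t ih =>
    have ha : (a == ' ') = false := h a (by simp)
    have ih' := ih (fun x hx => h x (by simp [hx]))
    cases hw : t ++ rest with
    | nil =>
      rcases List.append_eq_nil_iff.mp hw with ⟨h1, h2⟩
      subst h1; subst h2; rfl
    | cons b u =>
      show pvCollapse (a :: (t ++ rest)) = a :: t ++ pvCollapse rest
      rw [hw]
      show (if a == ' ' && b == ' ' then pvCollapse (b :: u) else a :: pvCollapse (b :: u))
            = a :: t ++ pvCollapse rest
      rw [← hw, ha]
      simpa using ih'

theorem collapse_space (r : List Char) :
    pvCollapse (' ' :: r) = ' ' :: pvCollapse (List.dropWhile (fun c => c == ' ') r) := by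
  induction r with
  | nil => rfl
  | cons b t ih =>
    by_cases hb : (b == ' ') = true
    · have hb' : b = ' ' := by simpa using hb
      subst hb'
      rw [show List.dropWhile (fun c => c == ' ') (' ' :: t)
            = List.dropWhile (fun c => c == ' ') t from by simp]
      show (if ' ' == ' ' && ' ' == ' ' then pvCollapse (' ' :: t) else ' ' :: pvCollapse (' ' :: t)) = _
      simpa using ih
    · have hb' : (b == ' ') = false := by simpa using hb
      rw [show List.dropWhile (fun c => c == ' ') (b :: t) = b :: t from by
        simp [hb']]
      show (if ' ' == ' ' && b == ' ' then pvCollapse (b :: t) else ' ' :: pvCollapse (b :: t)) = _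
      simp [hb']

theorem join_ne_nil (p : List Char) (qs : List (List Char)) (hp : p ≠ []) :
    PySem.Chars.join [' '] (p :: qs) ≠ [] := by
  cases qs with
  | nil => simpa [PySem.Chars.join_singleton] using hp
  | cons q t => simp [PySem.Chars.join_cons_cons, hp]

theorem rstripSp_cons_of_ne (a : Char) (X : List Char) (h : rstripSp X ≠ []) :
    rstripSp (a :: X) = a :: rstripSp X := by
  unfold rstripSp at *
  have hdw : List.dropWhile (fun c => c == ' ') X.reverse ≠ [] := by
    intro hc; apply h; rw [hc]; rfl
  rw [List.reverse_cons, List.dropWhile_append]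
  simp only [List.isEmpty_iff, hdw, if_neg, not_false_eq_true]
  simp

theorem rstripSp_nonspace_head (d : Char) (Y : List Char) (hd : (d == ' ') = false) :
    rstripSp (d :: Y) ≠ [] := by
  unfold rstripSp
  rw [List.reverse_cons, List.dropWhile_append]
  split
  · simp [List.dropWhile, hd]
  · simp

theorem rstripSp_append_of_ne (u v : List Char) (h : rstripSp v ≠ []) :
    rstripSp (u ++ v) = u ++ rstripSp v := by
  induction u with
  | nil => rfl
  | cons a t ih =>
    have h2 : rstripSp (t ++ v) ≠ [] := by
      rw [ih]; simp [h]
    rw [List.cons_append, rstripSp_cons_of_ne a _ h2, ih]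
    rfl

theorem rstripSp_all_nonspace (w : List Char) (h : ∀ x ∈ w, (x == ' ') = false) :
    rstripSp w = w := by
  unfold rstripSp
  rw [dropWhile_eq_self_of_all _ _ (fun x hx => h x (by simpa using hx))]
  simp

theorem pvLa_dropWhile (t : List Char) :
    pvLa (List.dropWhile (fun c => c == ' ') t) = pvLa t := by
  induction t with
  | nil => rfl
  | cons e u ih =>
    by_cases he : (e == ' ') = true
    · have he' : e = ' ' := by simpa using he
      subst he'
      rw [show List.dropWhile (fun c => c == ' ') (' ' :: u)
            = List.dropWhile (fun c => c == ' ') u from by simp]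
      rw [ih]
      show pvLa u = pvLa (' ' :: u)
      simp [pvLa, splitSp]
    · have he' : (e == ' ') = false := by simpa using he
      rw [show List.dropWhile (fun c => c == ' ') (e :: u) = e :: u from by
        simp [he']]

-- A's split-filter-join per-line value equals B's collapse-and-strip value.
theorem pvLa_eq_pvLb : ∀ (n : Nat) (cs : List Char), cs.length ≤ n → pvLa cs = pvLb cs := by
  intro n
  induction n with
  | zero =>
    intro cs h
    have : cs = [] := List.length_eq_zero_iff.mp (by omega)
    subst this; rfl
  | succ n ih =>
    intro cs hlen
    cases cs with
    | nil => rfl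
    | cons c r =>
      by_cases hc : (c == ' ') = true
      · -- leading space: both sides ignore it
        have hc' : c = ' ' := by simpa using hc
        subst hc'
        have hLa : pvLa (' ' :: r) = pvLa r := by
          simp [pvLa, splitSp]
        have hr4 : (List.dropWhile (fun c => c == ' ') r).length ≤ n := by
          have := List.length_dropWhile_le (fun c => (c == ' ')) r
          simp at hlen; omega
        have hLb : pvLb (' ' :: r) = pvLb (List.dropWhile (fun c => c == ' ') r) := by
          unfold pvLb
          rw [collapse_space r]
          rw [show List.dropWhile (fun c => c == ' ')
                (' ' :: pvCollapse (List.dropWhile (fun c => c == ' ') r))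
              = List.dropWhile (fun c => c == ' ')
                (pvCollapse (List.dropWhile (fun c => c == ' ') r)) from by
            simp]
        rw [hLa, hLb, ← ih _ hr4, pvLa_dropWhile r]
      · -- a word follows: peel the maximal non-space run
        have hsplit : List.takeWhile (fun x => !(x == ' ')) r ++ List.dropWhile (fun x => !(x == ' ')) r = r :=
          List.takeWhile_append_dropWhile
        set w0 := List.takeWhile (fun x => !(x == ' ')) r with hw0
        set rest := List.dropWhile (fun x => !(x == ' ')) r with hrest
        have hwall : ∀ x ∈ c :: w0, (x == ' ') = false := by
          intro x hx
          rcases List.mem_cons.mp hx with h1 | h2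
          · subst h1; simpa using hc
          · have := List.mem_takeWhile_imp h2
            simpa using this
        have hcs : c :: r = (c :: w0) ++ rest := by
          simp [← hsplit]
        rw [hcs]
        have hsplitSp := splitSp_nonspace_append (c :: w0) rest hwall
        have hcol := collapse_nonspace_append (c :: w0) rest hwall
        cases hrestc : rest with
        | nil =>
          -- the line is a single word
          rw [hrestc] at hsplitSp hcol
          unfold pvLa pvLb
          rw [List.append_nil] at hsplitSp hcol ⊢
          rw [hsplitSp, hcol]
          rw [show List.modifyHead (fun v => (c :: w0) ++ v) (splitSp []) = [(c :: w0) ++ []] from rfl]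
          rw [List.append_nil]
          rw [List.filter_cons_of_pos (by simp), List.filter_nil]
          rw [show pvCollapse ([] : List Char) = [] from rfl, List.append_nil]
          rw [dropWhile_eq_self_of_all _ _ hwall]
          rw [rstripSp_all_nonspace _ hwall]
          exact PySem.Chars.join_singleton _ _
        | cons b r2 =>
          have hb : (b == ' ') = true := by
            have := head_dropWhile_false (fun x => !(x == ' ')) r b r2 (by rw [← hrest, hrestc])
            simpa using this
          have hb' : b = ' ' := by simpa using hb
          subst hb'
          rw [hrestc] at hsplitSp hcol
          -- A side: the words are (c :: w0) followed by the words of r2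
          have hA : pvLa ((c :: w0) ++ ' ' :: r2)
              = (c :: w0) ++ (if pvLa r2 = [] then [] else ' ' :: pvLa r2) := by
            unfold pvLa
            rw [hsplitSp]
            rw [show splitSp (' ' :: r2) = [] :: splitSp r2 from by simp [splitSp]]
            rw [show List.modifyHead (fun v => (c :: w0) ++ v) ([] :: splitSp r2)
                  = ((c :: w0) ++ []) :: splitSp r2 from rfl]
            rw [List.append_nil]
            rw [List.filter_cons_of_pos (by simp)]
            cases hF : (splitSp r2).filter (fun w => !w.isEmpty) with
            | nil => simp [PySem.Chars.join_singleton, PySem.Chars.join_nil]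
            | cons q qs =>
              have hq : q ≠ [] := by
                have hmem : q ∈ (splitSp r2).filter (fun w => !w.isEmpty) := by rw [hF]; simp
                have := List.of_mem_filter hmem
                simpa using this
              have hne : PySem.Chars.join [' '] (q :: qs) ≠ [] := join_ne_nil q qs hq
              rw [PySem.Chars.join_cons_cons, if_neg hne]
              simp
          -- B side
          set r4 := List.dropWhile (fun c => c == ' ') r2 with hr4def
          have hr2n : r2.length ≤ n := by
            have h2 : r.length ≤ n := by simp at hlen; omega
            have h3 : r2.length ≤ r.length := by
              rw [← hsplit, hrestc]; simp; omega
            omega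
          have hr4len : r4.length ≤ n := by
            have h1 : r4.length ≤ r2.length := by
              rw [hr4def]; exact List.length_dropWhile_le _ r2
            omega
          have hIH : pvLa r4 = pvLb r4 := ih r4 hr4len
          have hLar2 : pvLa r2 = pvLa r4 := (pvLa_dropWhile r2).symm
          have hd4 : ∀ d t, r4 = d :: t → (d == ' ') = false := by
            intro d t hdt
            have := head_dropWhile_false (fun c => c == ' ') r2 d t (by rw [← hr4def]; exact hdt)
            simpa using this
          have hB : pvLb ((c :: w0) ++ ' ' :: r2)
              = (c :: w0) ++ (if pvLb r4 = [] then [] else ' ' :: pvLb r4) := by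
            unfold pvLb
            rw [hcol, collapse_space r2, ← hr4def]
            rw [show List.dropWhile (fun c => c == ' ') ((c :: w0) ++ ' ' :: pvCollapse r4)
                  = (c :: w0) ++ ' ' :: pvCollapse r4 from by
              simp [hwall c (by simp)]]
            cases hr4c : r4 with
            | nil =>
              rw [show pvCollapse ([] : List Char) = [] from rfl]
              rw [show rstripSp (List.dropWhile (fun c => c == ' ') ([] : List Char)) = [] from rfl]
              rw [if_pos rfl]
              have h5 : rstripSp ((c :: w0) ++ [' ']) = rstripSp (c :: w0) := by
                unfold rstripSp
                rw [List.reverse_append]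
                simp
              rw [h5, rstripSp_all_nonspace _ hwall, List.append_nil]
            | cons d t =>
              have hd : (d == ' ') = false := hd4 d t hr4c
              have hcolr4 : pvCollapse (d :: t) = d :: pvCollapse t := by
                have := collapse_nonspace_append [d] t (by
                  intro x hx; simp at hx; subst hx; exact hd)
                simpa using this
              have hne : rstripSp (pvCollapse (d :: t)) ≠ [] := by
                rw [hcolr4]; exact rstripSp_nonspace_head d _ hd
              have hne2 : rstripSp (' ' :: pvCollapse (d :: t)) ≠ [] := by
                rw [rstripSp_cons_of_ne _ _ hne]; simp
              rw [rstripSp_append_of_ne _ _ hne2]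
              rw [rstripSp_cons_of_ne _ _ hne]
              rw [show List.dropWhile (fun c => c == ' ') (pvCollapse (d :: t))
                    = pvCollapse (d :: t) from by rw [hcolr4]; simp [hd]]
              rw [if_neg hne]
          rw [hA, hB, hLar2, hIH]

theorem str_ne_empty_eq (t : String) : (t != "") = !t.toList.isEmpty := by
  have e : ("" : String).toList = [] := by decide
  by_cases h : t = ""
  · subst h; rfl
  · have h2 : t.toList ≠ [] := fun hc => h (String.toList_inj.mp (hc.trans e.symm))
    have hb : (t != "") = true := by simpa [bne_iff_ne] using h
    have hi : (!t.toList.isEmpty) = true := by simpa [List.isEmpty_iff] using h2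
    rw [hb, hi]

theorem contains_space_eq (c : Char) : ([' '].contains c) = (c == ' ') := by
  simp only [List.contains_eq_mem, List.mem_singleton]
  rw [Bool.eq_iff_iff]
  simp

theorem stripChars_sp (l : List Char) :
    PySem.Chars.stripChars l [' '] = rstripSp (List.dropWhile (fun c => c == ' ') l) := by
  unfold PySem.Chars.stripChars rstripSp
  rw [show (fun c => List.contains [' '] c) = (fun c : Char => c == ' ') from
    funext contains_space_eq]

-- per-line equality at the String level
theorem per_line (s : String) :
    PySem.Str.join " " (((PySem.Str.split? s " ").getD []).filter (fun t => t != ""))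
      = PySem.Str.stripChars (String.ofList (pvCollapse s.toList)) " " := by
  have hsep : (" " : String).toList = [' '] := by decide
  have h0 := PySem.Str.split?_map s " "
  rw [hsep] at h0
  rw [show PySem.Chars.split? s.toList [' ']
        = some (PySem.Chars.splitOn s.toList [' ']) from by simp [PySem.Chars.split?]] at h0
  cases hL : PySem.Str.split? s " " with
  | none => rw [hL] at h0; simp at h0
  | some L =>
    rw [hL] at h0
    have hmap : L.map String.toList = PySem.Chars.splitOn s.toList [' '] := by simpa using h0
    rw [← String.toList_inj]
    simp only [PySem.Str.toList_join, PySem.Str.toList_stripChars, String.toList_ofList,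
      hsep, Option.getD_some]
    rw [show (fun t : String => t != "") = (fun t => !t.toList.isEmpty) from
      funext str_ne_empty_eq]
    rw [show List.filter (fun t : String => !t.toList.isEmpty) L
          = List.filter ((fun w : List Char => !w.isEmpty) ∘ String.toList) L from rfl]
    rw [← List.filter_map]
    rw [hmap, splitOn_eq_splitSp, stripChars_sp]
    exact pvLa_eq_pvLb s.toList.length s.toList le_rfl

-- ===== VERDICT (by name: the statement is the Claim_ definition above) =====
set_option maxRecDepth 8192 in
theorem remove_extra_spaces_spec : Claim_equal_remove_extra_spaces := by
  unfold Claim_equal_remove_extra_spaces Spec_remove_extra_spaces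
  intro data _
  unfold remove_extra_spaces remove_extra_spaces_alt
  rw [PySem.List.foldl_pyRange_zero_pyGetD' data ""
      (fun acc line => acc ++ [PySem.Str.join " " (((PySem.Str.split? line " ").getD []).filter (fun s => s != ""))]) []]
  rw [PySem.List.foldl_append_singleton_eq_map
      (fun line => PySem.Str.join " " (((PySem.Str.split? line " ").getD []).filter (fun s => s != ""))) data []]
  rw [PySem.List.foldl_append_singleton_eq_map
      (fun line => PySem.Str.stripChars (String.ofList (pvCollapse line.toList)) " ") data []]
  simp only [List.nil_append]
  exact List.map_congr_left (fun s _ => per_line s)
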